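-- pv_equiv track=rewrite | github.com/Revi1337/BaekJoon-Coding-Test | 백준/Gold/5430. AC/AC.py | solution
-- ===== SOURCE A (Python) =====
-- from collections import deque
--
-- def solution(p, n, string):
--     string = [] if n == 0 else string[1:-2].split(',')
--
--     queue = deque(string)
--     left = n
--     reverse = -1
--     for operation in p:
--         if operation == 'R':
--             reverse *= -1
--             continue
--
--         if not left:
--             return 'error'
--
--         if reverse == 1:
--             queue.pop()
--         else:
--             queue.popleft()
--         left -= 1
--
--     if reverse == 1:
--         return f'[{",".join(map(str, list(queue)[::-1]))}]'
--     else: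
--         return f'[{",".join(map(str, list(queue)))}]'
-- ===== SOURCE B (Python) =====
-- def solution(p, n, string):
--     lst = [] if n == 0 else string[1:-2].split(',')
--     lo, hi = 0, len(lst)
--     left = n
--     flag = False
--     for op in p:
--         if op == 'R':
--             flag = not flag
--         elif left == 0:
--             return 'error'
--         else:
--             if flag:
--                 hi -= 1
--             else:
--                 lo += 1
--             left -= 1
--     res = lst[lo:hi]
--     if flag:
--         res = res[::-1]
--     return f'[{",".join(res)}]'
-- ===== Notes on version B (the rewrite author's own statement) =====
-- stated objective: alternative
-- what changed: B drops the deque entirely: one pass over p maintains a reverse flag and two cursor indices lo/hi into the parsed list (plus the left counter), and the answer is a single slice lst[lo:hi], reversed once if the flag is set, instead of A's per-operation deque pops and sign arithmetic.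
import Mathlib
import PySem

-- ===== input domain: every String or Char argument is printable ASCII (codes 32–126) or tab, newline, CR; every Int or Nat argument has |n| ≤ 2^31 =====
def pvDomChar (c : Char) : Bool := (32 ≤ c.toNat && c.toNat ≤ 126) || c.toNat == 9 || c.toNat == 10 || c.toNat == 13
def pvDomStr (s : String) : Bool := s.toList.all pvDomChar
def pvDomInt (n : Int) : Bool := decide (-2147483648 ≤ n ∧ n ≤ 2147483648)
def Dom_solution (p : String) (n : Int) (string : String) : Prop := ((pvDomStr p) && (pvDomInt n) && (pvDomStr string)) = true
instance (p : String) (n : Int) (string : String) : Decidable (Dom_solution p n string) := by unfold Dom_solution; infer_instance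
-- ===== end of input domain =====

-- B replaces A's deque with two cursor indices lo/hi and a reverse flag, taking one final
-- slice of the parsed list instead of popping per operation (objective: alternative).

-- ===== PORT A =====
-- shared parse line of both Pythons: `[] if n == 0 else string[1:-2].split(',')`
-- (sep "," is nonempty, so split? never returns none; getD [] is never taken)
def parseAC (n : Int) (string : String) : List String :=
  if n == 0 then []
  else (PySem.Str.split? (PySem.Str.slice string (some 1) (some (-2))) ",").getD []

-- A's for-loop; `none` models the IndexError of popping an empty deque (excluded by Pre_)
def loopA : List Char → List String → Int → Int → Option String
  | [], queue, _, reverse =>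
      -- `list(queue)[::-1]` is `queue.reverse` (PySem.List.slice?_none_none_neg_one);
      -- map(str, ·) on a list of str is the identity
      if reverse == 1 then some ("[" ++ PySem.Str.join "," queue.reverse ++ "]")
      else some ("[" ++ PySem.Str.join "," queue ++ "]")
  | op :: ops, queue, left, reverse =>
      if op == 'R' then loopA ops queue left (reverse * -1)
      else if left == 0 then some "error"
      else if reverse == 1 then
        if queue.isEmpty then none    -- queue.pop() on empty deque: IndexError
        else loopA ops queue.dropLast (left - 1) reverse
      else
        match queue with
        | [] => none                  -- queue.popleft() on empty deque: IndexError
        | _ :: queue' => loopA ops queue' (left - 1) reverse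

def solution (p : String) (n : Int) (string : String) : String :=
  match loopA p.toList (parseAC n string) n (-1) with
  | some s => s
  | none => ""   -- unreachable under Pre_ (Python raises IndexError there)

-- ===== PORT B =====
def loopB (lst : List String) : List Char → Int → Int → Int → Bool → String
  | [], lo, hi, _, flag =>
      let res := PySem.List.slice lst (some lo) (some hi)
      let res := if flag then res.reverse else res
      "[" ++ PySem.Str.join "," res ++ "]"
  | op :: ops, lo, hi, left, flag =>
      if op == 'R' then loopB lst ops lo hi left (!flag)
      else if left == 0 then "error"
      else if flag then loopB lst ops lo (hi - 1) (left - 1) flag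
      else loopB lst ops (lo + 1) hi (left - 1) flag

def solution_alt (p : String) (n : Int) (string : String) : String :=
  let lst := parseAC n string
  loopB lst p.toList 0 (PySem.List.len lst) n false

-- ===== PRECONDITION & SPEC =====
-- Pre_ excludes exactly the inputs on which A raises IndexError (popping an empty deque):
-- those where the number of executed deletions — min(n, #non-'R' ops) for n ≥ 0, all
-- #non-'R' ops for n < 0 — exceeds the length of the parsed list (#',' in string[1:-2], +1).
def Pre_solution (p : String) (n : Int) (string : String) : Prop :=
  (if 0 ≤ n then min n ((p.toList.countP (· != 'R') : Nat) : Int)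
   else ((p.toList.countP (· != 'R') : Nat) : Int))
    ≤ (if n == 0 then 0
       else (((PySem.Str.slice string (some 1) (some (-2))).toList.count ',' : Nat) : Int) + 1)
instance (p : String) (n : Int) (string : String) : Decidable (Pre_solution p n string) := by
  unfold Pre_solution; infer_instance

def pvWitness_solution : String × Int × String := ("RDD", 2, "[1,2,3]")

def Spec_solution (p : String) (n : Int) (string : String) (out : String) : Prop := out = solution_alt p n string
instance (p : String) (n : Int) (string : String) (out : String) : Decidable (Spec_solution p n string out) := by unfold Spec_solution; infer_instance

-- ===== CLAIM (what is proved, stated in full; the proofs are below) =====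
def Claim_equal_solution : Prop := ∀ (p : String) (n : Int) (string : String), Dom_solution p n string → Pre_solution p n string → Spec_solution p n string (solution p n string)

-- ===== LEMMAS AND PROOFS =====

-- number of pops A executes on the operation list `ops` starting from counter `left`
def popsFun : List Char → Int → Nat
  | [], _ => 0
  | op :: ops, left =>
      if op == 'R' then popsFun ops left
      else if left == 0 then 0
      else popsFun ops (left - 1) + 1

lemma popsFun_eq (ops : List Char) (left : Int) :
    (popsFun ops left : Int) =
      if 0 ≤ left then min left ((ops.countP (· != 'R') : Nat) : Int)
      else ((ops.countP (· != 'R') : Nat) : Int) := by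
  induction ops generalizing left with
  | nil =>
      simp only [popsFun, List.countP_nil, Nat.cast_zero]
      split_ifs <;> omega
  | cons op ops ih =>
      by_cases hR : op = 'R'
      · simpa [popsFun, hR] using ih left
      · have hc : (op :: ops).countP (· != 'R') = ops.countP (· != 'R') + 1 := by
          simp [hR]
        have hstep : left ≠ 0 →
            popsFun (op :: ops) left = popsFun ops (left - 1) + 1 := by
          intro h0; simp [popsFun, hR, h0]
        have h := ih (left - 1)
        rcases lt_trichotomy left 0 with hl | hl | hl
        · rw [if_neg (by omega)] at h ⊢
          rw [hstep (by omega), hc]; push_cast; omega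
        · subst hl
          have hz : popsFun (op :: ops) 0 = 0 := by simp [popsFun, hR]
          rw [hz, hc, if_pos le_rfl]; push_cast; omega
        · rw [if_pos (by omega)] at h ⊢
          rw [hstep (by omega), hc]; push_cast; omega

lemma go_comma_zero (l cur : List Char) (acc : List (List Char)) :
    PySem.Chars.splitOn.go [','] 0 l cur acc = ((cur.reverse ++ l) :: acc).reverse := by
  rw [PySem.Chars.splitOn.go]

lemma go_comma_nil (fuel : Nat) (cur : List Char) (acc : List (List Char)) :
    PySem.Chars.splitOn.go [','] (fuel + 1) [] cur acc = (cur.reverse :: acc).reverse := by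
  rw [PySem.Chars.splitOn.go]
  omega

lemma go_comma_cons (fuel : Nat) (c : Char) (rest cur : List Char) (acc : List (List Char)) :
    PySem.Chars.splitOn.go [','] (fuel + 1) (c :: rest) cur acc
      = if [','].isPrefixOf (c :: rest)
          then PySem.Chars.splitOn.go [','] fuel (List.drop [','].length (c :: rest)) [] (cur.reverse :: acc)
          else PySem.Chars.splitOn.go [','] fuel rest (c :: cur) acc := by
  rw [PySem.Chars.splitOn.go]

lemma splitOn_go_comma_length (fuel : Nat) (l cur : List Char) (acc : List (List Char))
    (h : l.length ≤ fuel) :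
    (PySem.Chars.splitOn.go [','] fuel l cur acc).length = acc.length + 1 + l.count ',' := by
  induction fuel generalizing l cur acc with
  | zero =>
      have hl : l = [] := List.length_eq_zero_iff.mp (Nat.le_zero.mp h)
      subst hl; rw [go_comma_zero]; simp
  | succ fuel ih =>
      cases l with
      | nil => rw [go_comma_nil]; simp
      | cons c rest =>
          rw [go_comma_cons]
          by_cases hc : c = ','
          · subst hc
            rw [if_pos (by simp [List.isPrefixOf])]
            simp only [List.length_singleton, List.drop_succ_cons, List.drop_zero]
            rw [ih rest [] (cur.reverse :: acc) (by simpa using Nat.le_of_succ_le_succ h)]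
            simp
            omega
          · have hnp : ¬ ([','].isPrefixOf (c :: rest) = true) := by
              simp only [List.isPrefixOf, Bool.and_eq_true, beq_iff_eq]
              exact fun hp => hc hp.1.symm
            rw [if_neg hnp]
            rw [ih rest (c :: cur) acc (by simpa using Nat.le_of_succ_le_succ h)]
            simp [hc]

lemma parseAC_length (n : Int) (string : String) (h : ¬ n == 0) :
    (parseAC n string).length
      = (PySem.Str.slice string (some 1) (some (-2))).toList.count ',' + 1 := by
  have hn : ¬ n = 0 := by simpa using h
  unfold parseAC
  have hn' : ¬ ((n == 0) = true) := by simpa using hn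
  rw [if_neg hn']
  set s := PySem.Str.slice string (some 1) (some (-2)) with hs
  have : PySem.Str.split? s "," = some ((PySem.Chars.splitOn s.toList [',']).map String.ofList) := rfl
  rw [this]
  simp only [Option.getD_some, List.length_map]
  unfold PySem.Chars.splitOn
  rw [splitOn_go_comma_length _ _ _ _ (by omega)]
  simp only [List.length_nil, Nat.zero_add]
  omega

lemma loop_eq (lst : List String) (ops : List Char) (lo hi : Nat) (left : Int) (flag : Bool)
    (hlo : lo ≤ hi) (hhi : hi ≤ lst.length) (hp : popsFun ops left ≤ hi - lo) :
    loopA ops ((lst.drop lo).take (hi - lo)) left (if flag then 1 else -1)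
      = some (loopB lst ops (lo : Int) (hi : Int) left flag) := by
  induction ops generalizing lo hi left flag with
  | nil =>
      have hslice : PySem.List.slice lst (some (lo : Int)) (some (hi : Int))
          = (lst.drop lo).take (hi - lo) := PySem.List.slice_natCast lst lo hi
      cases flag <;> simp [loopA, loopB, hslice]
  | cons op ops ih =>
      by_cases hR : op = 'R'
      · have hflip : (if flag then (1:Int) else -1) * -1 = if !flag then 1 else -1 := by
          cases flag <;> norm_num
        simpa [loopA, loopB, hR, hflip] using ih lo hi left (!flag) hlo hhi (by simpa [popsFun, hR] using hp)
      · by_cases h0 : left = 0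
        · simp [loopA, loopB, hR, h0]
        · have hq : popsFun (op :: ops) left = popsFun ops (left - 1) + 1 := by
            simp [popsFun, hR, h0]
          have hlt : lo < hi := by omega
          have hqlen : ((lst.drop lo).take (hi - lo)).length = hi - lo := by
            simp [List.length_take, List.length_drop]; omega
          have hne : (lst.drop lo).take (hi - lo) ≠ [] := by
            intro he; rw [he] at hqlen; simp at hqlen; omega
          cases flag with
          | true =>
              have hdl : ((lst.drop lo).take (hi - lo)).dropLast
                  = (lst.drop lo).take (hi - 1 - lo) := by
                rw [List.dropLast_eq_take, hqlen, List.take_take]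
                congr 1; omega
              have hrec := ih lo (hi - 1) (left - 1) true (by omega) (by omega)
                (by rw [hq] at hp; omega)
              have hcast : ((hi - 1 : Nat) : Int) = (hi : Int) - 1 := by omega
              rw [hcast] at hrec
              simp only [loopA, loopB, hR, h0, if_false, beq_iff_eq, if_true, beq_self_eq_true,
                List.isEmpty_iff, hdl]
              simpa [hne] using hrec
          | false =>
              have htl : ((lst.drop lo).take (hi - lo)).tail
                  = (lst.drop (lo + 1)).take (hi - (lo + 1)) := by
                rw [← List.drop_one, List.drop_take, List.drop_drop]
                congr 1
              have hrec := ih (lo + 1) hi (left - 1) false (by omega) hhi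
                (by rw [hq] at hp; omega)
              have hcast : ((lo + 1 : Nat) : Int) = (lo : Int) + 1 := by omega
              rw [hcast] at hrec
              obtain ⟨x, q', hxq⟩ := List.exists_cons_of_ne_nil hne
              have htl' : q' = (lst.drop (lo + 1)).take (hi - (lo + 1)) := by
                rw [← htl, hxq]; rfl
              simp only [loopA, loopB, hR, h0, if_false, beq_iff_eq, hxq]
              rw [htl'] at hxq ⊢
              simpa using hrec

-- ===== VERDICT (by name: the statement is the Claim_ definition above) =====
theorem solution_spec : Claim_equal_solution := by
  intro p n string _ hpre
  unfold Spec_solution solution solution_alt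
  set lst := parseAC n string with hlst
  have hp : popsFun p.toList n ≤ lst.length := by
    have hchar := popsFun_eq p.toList n
    by_cases h0 : n == 0
    · have hn : n = 0 := by simpa using h0
      subst hn
      simp only [le_refl, if_pos] at hchar
      omega
    · have hlen := parseAC_length n string h0
      unfold Pre_solution at hpre
      rw [if_neg h0] at hpre
      rw [← hlst] at hlen
      split_ifs at hchar hpre <;> omega
  have h := loop_eq lst p.toList 0 lst.length n false (Nat.zero_le _) le_rfl
    (by simpa using hp)
  simp only [List.drop_zero, Nat.sub_zero, List.take_length, Nat.cast_zero] at h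
  rw [show (if false then (1:Int) else -1) = -1 from rfl] at h
  rw [h]
  simp [PySem.List.len_eq]
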